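-- pv_equiv track=rewrite | github.com/snoop-ia/snoop | scripts/utils/json_dict_manip.py | insert_dict_between_keys
-- ===== SOURCE A (Python) =====
-- def insert_dict_between_keys(original_dict: dict, key_before: str, key_after: str, new_dict: dict) -> dict:
--     if key_before not in original_dict or key_after not in original_dict:
--         raise ValueError("Both keys must exist in the original dictionary.")
--
--     keys = list(original_dict.keys())
--     if keys.index(key_before) >= keys.index(key_after):
--         raise ValueError("key_before must be before key_after in the dictionary.")
--
--     # Find the positions for splitting
--     pos_before = keys.index(key_before) + 1
--     pos_after = keys.index(key_after)
--
--     # Divide into two parts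
--     first_part = {k: original_dict[k] for k in keys[:pos_after]}
--     second_part = {k: original_dict[k] for k in keys[pos_after:]}
--
--     # Merge the dictionaries
--     new_dict_ordered = {**first_part, **new_dict, **second_part}
--
--     return new_dict_ordered
-- ===== SOURCE B (Python) =====
-- def insert_dict_between_keys(original_dict: dict, key_before: str, key_after: str, new_dict: dict) -> dict:
--     if key_before not in original_dict or key_after not in original_dict:
--         raise ValueError("Both keys must exist in the original dictionary.")
--
--     keys = list(original_dict)
--     if keys.index(key_before) >= keys.index(key_after):
--         raise ValueError("key_before must be before key_after in the dictionary.")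
--
--     # Single streaming pass: copy entries in order, splicing new_dict in
--     # right before key_after.  Updating an existing key keeps its position
--     # and takes the later value, exactly like the {**a, **b, **c} merge.
--     result = {}
--     for k, v in original_dict.items():
--         if k == key_after:
--             result.update(new_dict)
--         result[k] = v
--     return result
-- ===== Notes on version B (the rewrite author's own statement) =====
-- stated objective: simpler
-- what changed: Replaces the split-into-two-dict-comprehensions-then-three-way-{**...}-merge with one streaming pass over original_dict.items() that splices new_dict in just before key_after, relying on dict update-in-place keeping key positions.
import Mathlib
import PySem

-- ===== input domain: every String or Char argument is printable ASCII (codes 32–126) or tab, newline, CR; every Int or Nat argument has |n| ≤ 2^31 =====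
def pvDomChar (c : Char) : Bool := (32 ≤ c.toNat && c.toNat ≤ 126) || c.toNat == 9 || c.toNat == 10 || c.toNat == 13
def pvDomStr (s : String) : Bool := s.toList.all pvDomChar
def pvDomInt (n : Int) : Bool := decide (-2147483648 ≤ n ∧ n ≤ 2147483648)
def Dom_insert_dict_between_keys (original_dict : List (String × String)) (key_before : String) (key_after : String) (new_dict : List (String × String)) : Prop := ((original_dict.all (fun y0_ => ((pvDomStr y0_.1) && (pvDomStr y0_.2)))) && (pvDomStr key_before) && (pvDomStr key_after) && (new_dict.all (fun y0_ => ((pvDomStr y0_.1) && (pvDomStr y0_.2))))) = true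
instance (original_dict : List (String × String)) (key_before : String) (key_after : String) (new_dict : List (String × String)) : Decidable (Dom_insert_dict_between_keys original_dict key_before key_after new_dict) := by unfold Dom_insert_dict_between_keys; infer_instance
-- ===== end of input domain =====

-- B replaces A's slice-comprehensions + three-way {**...} merge by one streaming pass
-- over original_dict.items() that splices new_dict in just before key_after (objective: simpler).

-- ===== PORT A =====
-- Literal port of A.  The dict argument is its association list; raise paths return [].
-- keys[:pos_after] / keys[pos_after:] are PySem.List.slice; original_dict[k] is Dict.getD
-- (the key is always present on the reached branch, so the "" default is never used);
-- {**first_part, **new_dict, **second_part} is a fresh dict updated by the three item lists in order.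
def insert_dict_between_keys (original_dict : List (String × String)) (key_before : String) (key_after : String) (new_dict : List (String × String)) : List (String × String) :=
  let d : PySem.Dict String String := ⟨original_dict⟩
  if d.contains key_before = false ∨ d.contains key_after = false then []  -- raise ValueError
  else
    let keys := d.keys
    match PySem.List.index? keys key_before, PySem.List.index? keys key_after with
    | some ib, some ia =>
      if ib ≥ ia then []  -- raise ValueError
      else
        let pos_after := ia
        let first_part := (PySem.List.slice keys none (some (pos_after : Int))).foldl
            (fun fp k => fp.insert k (d.getD k "")) PySem.Dict.empty
        let second_part := (PySem.List.slice keys (some (pos_after : Int)) none).foldl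
            (fun sp k => sp.insert k (d.getD k "")) PySem.Dict.empty
        let merged := second_part.items.foldl (fun m p => m.insert p.1 p.2)
            (new_dict.foldl (fun m p => m.insert p.1 p.2)
              (first_part.items.foldl (fun m p => m.insert p.1 p.2) PySem.Dict.empty))
        merged.items
    | _, _ => []  -- unreachable: both keys are contained

-- ===== PORT B =====
-- Literal port of B: one fold over original_dict's items; when the key equals key_after,
-- new_dict is folded in (result.update(new_dict)) before inserting the current item.
def insert_dict_between_keys_alt (original_dict : List (String × String)) (key_before : String) (key_after : String) (new_dict : List (String × String)) : List (String × String) :=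
  let keys := original_dict.map Prod.fst
  if key_before ∉ keys ∨ key_after ∉ keys then []  -- raise ValueError
  else if keys.idxOf key_before ≥ keys.idxOf key_after then []  -- raise ValueError
  else
    (original_dict.foldl
      (fun (r : PySem.Dict String String) p =>
        (if p.1 = key_after then new_dict.foldl (fun r q => r.insert q.1 q.2) r else r).insert p.1 p.2)
      PySem.Dict.empty).items

-- ===== PRECONDITION & SPEC =====
-- Pre_ excludes the inputs where A raises ValueError (a key missing from original_dict, or
-- key_before not strictly before key_after), and association lists with duplicate keys, which
-- do not represent Python dicts (a dict's keys are unique; both programs receive real dicts).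
def Pre_insert_dict_between_keys (original_dict : List (String × String)) (key_before : String) (key_after : String) (new_dict : List (String × String)) : Prop :=
  (original_dict.map Prod.fst).Nodup ∧ (new_dict.map Prod.fst).Nodup ∧
  key_before ∈ original_dict.map Prod.fst ∧ key_after ∈ original_dict.map Prod.fst ∧
  (original_dict.map Prod.fst).idxOf key_before < (original_dict.map Prod.fst).idxOf key_after
instance (original_dict : List (String × String)) (key_before : String) (key_after : String) (new_dict : List (String × String)) : Decidable (Pre_insert_dict_between_keys original_dict key_before key_after new_dict) := by unfold Pre_insert_dict_between_keys; infer_instance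

def pvWitness_insert_dict_between_keys : (List (String × String)) × String × String × (List (String × String)) :=
  ([("a", "1"), ("b", "2")], "a", "b", [("x", "9")])

def Spec_insert_dict_between_keys (original_dict : List (String × String)) (key_before : String) (key_after : String) (new_dict : List (String × String)) (out : List (String × String)) : Prop := out = insert_dict_between_keys_alt original_dict key_before key_after new_dict
instance (original_dict : List (String × String)) (key_before : String) (key_after : String) (new_dict : List (String × String)) (out : List (String × String)) : Decidable (Spec_insert_dict_between_keys original_dict key_before key_after new_dict out) := by unfold Spec_insert_dict_between_keys; infer_instance

-- ===== CLAIM (what is proved, stated in full; the proofs are below) =====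
def Claim_equal_insert_dict_between_keys : Prop := ∀ (original_dict : List (String × String)) (key_before : String) (key_after : String) (new_dict : List (String × String)), Dom_insert_dict_between_keys original_dict key_before key_after new_dict → Pre_insert_dict_between_keys original_dict key_before key_after new_dict → Spec_insert_dict_between_keys original_dict key_before key_after new_dict (insert_dict_between_keys original_dict key_before key_after new_dict)

-- ===== LEMMAS AND PROOFS =====


theorem pv_index?_eq_idxOf {xs : List String} {v : String} (h : v ∈ xs) :
    PySem.List.index? xs v = some (xs.idxOf v) := by
  induction xs with
  | nil => simp at h
  | cons x xs ih =>
    by_cases hx : x = v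
    · subst hx; rw [PySem.List.index?_cons_self]; simp
    · rw [PySem.List.index?_cons_of_ne xs hx, ih (by cases List.mem_cons.mp h with | inl h' => exact absurd h'.symm hx | inr h' => exact h')]
      simp [hx]

theorem pv_comp_eq (od M : List (String × String)) (acc : PySem.Dict String String)
    (h : ∀ p ∈ M, (⟨od⟩ : PySem.Dict String String).get? p.1 = some p.2) :
    (M.map Prod.fst).foldl (fun fp k => fp.insert k ((⟨od⟩ : PySem.Dict String String).getD k "")) acc
      = M.foldl (fun m p => m.insert p.1 p.2) acc := by
  induction M generalizing acc with
  | nil => rfl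
  | cons p M ih =>
    simp only [List.map_cons, List.foldl_cons]
    rw [PySem.Dict.getD_of_get?_eq_some _ _ (h p (by simp))]
    exact ih _ (fun q hq => h q (by simp [hq]))

theorem pv_bseg (ka : String) (nd L : List (String × String)) (acc : PySem.Dict String String)
    (h : ka ∉ L.map Prod.fst) :
    L.foldl (fun (r : PySem.Dict String String) p =>
        (if p.1 = ka then nd.foldl (fun r q => r.insert q.1 q.2) r else r).insert p.1 p.2) acc
      = L.foldl (fun m p => m.insert p.1 p.2) acc := by
  induction L generalizing acc with
  | nil => rfl
  | cons p L ih =>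
    simp only [List.map_cons, List.mem_cons, not_or] at h
    have hne : ¬ p.1 = ka := fun e => h.1 e.symm
    simp only [List.foldl_cons, if_neg hne]
    exact ih _ h.2


theorem pv_idxOf_append (v : String) (l1 l2 : List String) (h : v ∉ l1) :
    (l1 ++ v :: l2).idxOf v = l1.length := by
  have h1 := pv_index?_eq_idxOf (xs := l1 ++ v :: l2) (v := v) (by simp)
  have h2 := (PySem.List.index?_eq_some_iff (l1 ++ v :: l2) v l1.length).mpr ⟨l1, l2, rfl, rfl, h⟩
  exact Option.some.inj (h1.symm.trans h2)

-- A's port, evaluated on the decomposition of original_dict at the first occurrence of key_after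
theorem pv_A_eval (L1 L2 nd : List (String × String)) (kb ka : String) (va : String)
    (hkb : kb ∈ (L1 ++ (ka, va) :: L2).map Prod.fst)
    (hnod : ((L1 ++ (ka, va) :: L2).map Prod.fst).Nodup)
    (hlt : ((L1 ++ (ka, va) :: L2).map Prod.fst).idxOf kb < ((L1 ++ (ka, va) :: L2).map Prod.fst).idxOf ka) :
    insert_dict_between_keys (L1 ++ (ka, va) :: L2) kb ka nd
      = (L2.foldl (fun m p => m.insert p.1 p.2)
          ((nd.foldl (fun m p => m.insert p.1 p.2)
            (L1.foldl (fun m p => m.insert p.1 p.2) PySem.Dict.empty)).insert ka va)).items := by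
  have hn : ((L1.map Prod.fst) ++ ka :: L2.map Prod.fst).Nodup := by simpa using hnod
  obtain ⟨hn1, hn2, hdisj⟩ := List.nodup_append.mp hn
  have hka1 : ka ∉ L1.map Prod.fst := fun hm => hdisj ka hm ka (List.mem_cons_self) rfl
  have hka' : ka ∈ (L1 ++ (ka, va) :: L2).map Prod.fst := by simp
  have hkeys : (⟨L1 ++ (ka, va) :: L2⟩ : PySem.Dict String String).keys
      = (L1 ++ (ka, va) :: L2).map Prod.fst := rfl
  have hget : ∀ p ∈ L1 ++ (ka, va) :: L2,
      (⟨L1 ++ (ka, va) :: L2⟩ : PySem.Dict String String).get? p.1 = some p.2 := by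
    intro p hp
    exact PySem.Dict.get?_of_mem_items _ hp hnod
  have hia : ((L1 ++ (ka, va) :: L2).map Prod.fst).idxOf ka = (L1.map Prod.fst).length := by
    simp only [List.map_append, List.map_cons]
    exact pv_idxOf_append ka _ _ hka1
  have hckb : (⟨L1 ++ (ka, va) :: L2⟩ : PySem.Dict String String).contains kb = true := by
    rw [PySem.Dict.contains_eq_decide_mem_keys, hkeys]; exact decide_eq_true hkb
  have hcka : (⟨L1 ++ (ka, va) :: L2⟩ : PySem.Dict String String).contains ka = true := by
    rw [PySem.Dict.contains_eq_decide_mem_keys, hkeys]; exact decide_eq_true hka'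
  have hge : ¬ ((L1 ++ (ka, va) :: L2).map Prod.fst).idxOf ka ≤ ((L1 ++ (ka, va) :: L2).map Prod.fst).idxOf kb :=
    not_le.mpr hlt
  simp only [insert_dict_between_keys]
  rw [if_neg (by simp [hckb, hcka]), hkeys, pv_index?_eq_idxOf hkb, pv_index?_eq_idxOf hka']
  simp only [ge_iff_le, hia, PySem.List.slice_to_natCast, PySem.List.slice_from_natCast]
  rw [show (L1 ++ (ka, va) :: L2).map Prod.fst = (L1.map Prod.fst) ++ ka :: L2.map Prod.fst by simp,
      List.take_left, List.drop_left,
      pv_comp_eq (L1 ++ (ka, va) :: L2) L1 PySem.Dict.empty (fun p hp => hget p (List.mem_append_left _ hp)),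
      show (ka :: L2.map Prod.fst) = ((ka, va) :: L2).map Prod.fst by simp,
      pv_comp_eq (L1 ++ (ka, va) :: L2) ((ka, va) :: L2) PySem.Dict.empty
        (fun p hp => hget p (List.mem_append_right _ hp)),
      PySem.Dict.items_foldl_insert_fresh L1 Prod.fst Prod.snd PySem.Dict.empty
        (fun a _ => by simp) hn1,
      PySem.Dict.items_foldl_insert_fresh ((ka, va) :: L2) Prod.fst Prod.snd PySem.Dict.empty
        (fun a _ => by simp) (by simpa using hn2)]
  simp only [show (PySem.Dict.empty : PySem.Dict String String).items = [] from rfl,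
    List.nil_append, Prod.mk.eta, List.map_id', List.foldl_cons]
  rw [if_neg (by
    rw [show List.map Prod.fst L1 ++ List.map Prod.fst ((ka, va) :: L2)
          = List.map Prod.fst (L1 ++ (ka, va) :: L2) from (List.map_append ..).symm, ← hia]
    exact hge)]

-- B's port, evaluated on the same decomposition: the same dict
theorem pv_B_eval (L1 L2 nd : List (String × String)) (kb ka : String) (va : String)
    (hkb : kb ∈ (L1 ++ (ka, va) :: L2).map Prod.fst)
    (hnod : ((L1 ++ (ka, va) :: L2).map Prod.fst).Nodup)
    (hlt : ((L1 ++ (ka, va) :: L2).map Prod.fst).idxOf kb < ((L1 ++ (ka, va) :: L2).map Prod.fst).idxOf ka) :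
    insert_dict_between_keys_alt (L1 ++ (ka, va) :: L2) kb ka nd
      = (L2.foldl (fun m p => m.insert p.1 p.2)
          ((nd.foldl (fun m p => m.insert p.1 p.2)
            (L1.foldl (fun m p => m.insert p.1 p.2) PySem.Dict.empty)).insert ka va)).items := by
  have hn : ((L1.map Prod.fst) ++ ka :: L2.map Prod.fst).Nodup := by simpa using hnod
  obtain ⟨hn1, hn2, hdisj⟩ := List.nodup_append.mp hn
  have hka1 : ka ∉ L1.map Prod.fst := fun hm => hdisj ka hm ka (List.mem_cons_self) rfl
  have hka2 : ka ∉ L2.map Prod.fst := (List.nodup_cons.mp hn2).1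
  simp only [insert_dict_between_keys_alt]
  rw [if_neg (not_or.mpr ⟨not_not.mpr hkb, not_not.mpr (by simp)⟩), if_neg (not_le.mpr hlt),
      List.foldl_append, pv_bseg ka nd L1 _ hka1, List.foldl_cons, if_pos rfl,
      pv_bseg ka nd L2 _ hka2]

-- ===== VERDICT (by name: the statement is the Claim_ definition above) =====
theorem insert_dict_between_keys_spec : Claim_equal_insert_dict_between_keys := by
  intro od kb ka nd _ hpre
  obtain ⟨hnod, hnnd, hkb, hka, hlt⟩ := hpre
  obtain ⟨p, hp, hpa⟩ := List.mem_map.mp hka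
  obtain ⟨L1, L2, hod⟩ := List.append_of_mem hp
  have hpv : p = (ka, p.2) := by cases p; simp_all
  rw [hpv] at hod; subst hod
  unfold Spec_insert_dict_between_keys
  rw [pv_A_eval L1 L2 nd kb ka p.2 hkb hnod hlt,
      pv_B_eval L1 L2 nd kb ka p.2 hkb hnod hlt]
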